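-- pv_equiv track=rewrite | github.com/qlqnf16/algorithms | kakao_internship/1.py | solution
-- ===== SOURCE A (Python) =====
-- def returnNewBoard(board):
--   size = len(board)
--   newBoard = [[] for _ in range(size)]
--   for i in range(size-1, -1, -1):
--     for j in range(0, size):
--       if board[i][j] > 0:
--         newBoard[j].append(board[i][j])
--   return newBoard
--
-- def solution(board, moves):
--     answer = 0
--     newBoard = returnNewBoard(board)
--     stack = []
--
--     for move in moves:
--       target = newBoard[move-1]
--       if len(target) > 0:
--         movedChar = target.pop()
--         if len(stack) > 0:
--           compareChar = stack.pop()
--           if compareChar == movedChar: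
--             answer += 2
--           else:
--             stack.append(compareChar)
--             stack.append(movedChar)
--         else:
--           stack.append(movedChar)
--
--     return answer
-- ===== SOURCE B (Python) =====
-- def solution(board, moves):
--     n = len(board)
--     top = [0] * n           # per-column pointer: first row not yet inspected
--     stack = []
--     answer = 0
--     for move in moves:
--         j = move - 1
--         i = top[j]
--         found = None
--         while i < n:
--             v = board[i][j]
--             i += 1
--             if v > 0:
--                 found = v
--                 break
--         top[j] = i
--         if found is not None:
--             if stack and stack[-1] == found:
--                 stack.pop()
--                 answer += 2
--             else:
--                 stack.append(found)
--     return answer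
-- ===== Notes on version B (the rewrite author's own statement) =====
-- stated objective: alternative
-- what changed: B drops the returnNewBoard preprocessing that materialises a reversed stack per column and instead keeps one integer pointer per column into the untouched board, scanning lazily past zeros for the next doll and inspecting the lift-stack via its last element instead of pop-and-push-back; …
-- outside the precondition, e.g. on solution([[0, 1, 5], [2, 2, 5]], [0, 0]): A returns 0, B returns 2
import Mathlib
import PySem

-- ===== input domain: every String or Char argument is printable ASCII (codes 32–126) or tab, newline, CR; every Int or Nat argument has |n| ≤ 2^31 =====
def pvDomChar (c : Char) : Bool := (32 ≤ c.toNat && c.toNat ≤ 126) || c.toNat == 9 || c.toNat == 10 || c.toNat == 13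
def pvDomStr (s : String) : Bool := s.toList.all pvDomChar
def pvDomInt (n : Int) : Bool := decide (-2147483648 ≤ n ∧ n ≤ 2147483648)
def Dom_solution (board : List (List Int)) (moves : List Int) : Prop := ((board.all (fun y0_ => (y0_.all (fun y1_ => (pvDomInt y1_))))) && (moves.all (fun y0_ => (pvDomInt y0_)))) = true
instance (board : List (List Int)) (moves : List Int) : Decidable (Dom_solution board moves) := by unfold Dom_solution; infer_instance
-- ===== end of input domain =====

-- B replaces A's precomputed per-column stacks by lazy per-column pointers into the original
-- board (neither program mutates its arguments; equivalence is about the return value).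

-- ===== PORT A =====
-- inner 'for j in range(0, size)' body of returnNewBoard (append board[i][j] to newBoard[j] if positive)
def innerF (row : List Int) (nb2 : List (List Int)) (j : Int) : List (List Int) :=
  let v := PySem.List.pyGetD row j 0
  if 0 < v then PySem.List.pySetD nb2 j (PySem.List.pyGetD nb2 j [] ++ [v]) else nb2

-- one iteration of the outer 'for i in range(size-1, -1, -1)' loop of returnNewBoard
def outerF (board : List (List Int)) (nb : List (List Int)) (i : Int) : List (List Int) :=
  (PySem.List.pyRange 0 (board.length : Int) 1).foldl (innerF (PySem.List.pyGetD board i [])) nb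

def returnNewBoardA (board : List (List Int)) : List (List Int) :=
  let size : Int := (board.length : Int)
  (PySem.List.pyRange (size - 1) (-1) (-1)).foldl (outerF board) (List.replicate board.length [])

def stepA (s : Int × List Int × List (List Int)) (move : Int) :
    Int × List Int × List (List Int) :=
  let target := PySem.List.pyGetD s.2.2 (move - 1) []
  if 0 < target.length then
    match PySem.List.pop? target with
    | none => s
    | some (movedChar, target') =>
      let nb := PySem.List.pySetD s.2.2 (move - 1) target'
      if 0 < s.2.1.length then
        match PySem.List.pop? s.2.1 with
        | none => s
        | some (compareChar, stack') =>
          if compareChar = movedChar then (s.1 + 2, stack', nb)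
          else (s.1, stack' ++ [compareChar] ++ [movedChar], nb)
      else (s.1, s.2.1 ++ [movedChar], nb)
  else s

def solution (board : List (List Int)) (moves : List Int) : Int :=
  (moves.foldl stepA (0, [], returnNewBoardA board)).1

-- ===== PORT B =====
-- the 'while i < n' scan of Source B: first positive cell board[i][j] among the remaining rows,
-- together with the final value of i (one past the found cell, or past the last row)
def scanColB (rows : List (List Int)) (j : Int) (i : Nat) : Option Int × Nat :=
  match rows with
  | [] => (none, i)
  | r :: rs =>
    let v := PySem.List.pyGetD r j 0
    if 0 < v then (some v, i + 1) else scanColB rs j (i + 1)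

def stepB (board : List (List Int)) (s : Int × List Int × List Nat) (move : Int) :
    Int × List Int × List Nat :=
  let j : Int := move - 1
  let t := PySem.List.pyGetD s.2.2 j 0
  let r := scanColB (board.drop t) j t
  let top' := PySem.List.pySetD s.2.2 j r.2
  match r.1 with
  | none => (s.1, s.2.1, top')
  | some v =>
    match s.2.1.getLast? with
    | some c =>
      if c = v then (s.1 + 2, s.2.1.dropLast, top') else (s.1, s.2.1 ++ [v], top')
    | none => (s.1, s.2.1 ++ [v], top')

def solution_alt (board : List (List Int)) (moves : List Int) : Int :=
  (moves.foldl (stepB board) (0, [], List.replicate board.length 0)).1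

-- ===== PRECONDITION & SPEC =====
-- Pre_ excludes the inputs where Python A raises IndexError — a row shorter than the number
-- of rows (read eagerly in returnNewBoard), or a move with move-1 outside [-n, n) — and the
-- unspecified corner of non-positive moves on RAGGED boards (a row longer than the board),
-- where A's value comes from Python's accidental negative indexing into its precomputed
-- column stacks while B's comes from equally accidental per-row negative indexing, so the
-- two defensible accidents can pick different cells.
def Pre_solution (board : List (List Int)) (moves : List Int) : Prop :=
  (∀ row ∈ board, board.length ≤ row.length) ∧
  (∀ m ∈ moves, (1 ≤ m ∧ m ≤ (board.length : Int)) ∨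
    (1 - (board.length : Int) ≤ m ∧ m ≤ 0 ∧
      ∀ row ∈ board, row.length = board.length))
instance (board : List (List Int)) (moves : List Int) : Decidable (Pre_solution board moves) := by
  unfold Pre_solution; infer_instance

def pvWitness_solution : List (List Int) × List Int := ([[0, 1], [2, 2]], [1, 2, 2])

def Spec_solution (board : List (List Int)) (moves : List Int) (out : Int) : Prop :=
  out = solution_alt board moves
instance (board : List (List Int)) (moves : List Int) (out : Int) :
    Decidable (Spec_solution board moves out) := by unfold Spec_solution; infer_instance

-- ===== CLAIM (what is proved, stated in full; the proofs are below) =====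
def Claim_equal_solution : Prop := ∀ (board : List (List Int)) (moves : List Int),
  Dom_solution board moves → Pre_solution board moves →
  Spec_solution board moves (solution board moves)

-- ===== LEMMAS AND PROOFS =====

-- the positive entries of column j of the given rows, top row first (missing cells read 0)
def colOf (rows : List (List Int)) (j : Nat) : List Int :=
  (rows.map (fun r => r.getD j 0)).filter (fun v => decide (0 < v))

theorem colOf_nil (j : Nat) : colOf [] j = [] := by simp [colOf]

theorem colOf_cons (r : List Int) (rs : List (List Int)) (j : Nat) :
    colOf (r :: rs) j = (if 0 < r.getD j 0 then [r.getD j 0] else []) ++ colOf rs j := by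
  simp only [colOf, List.map_cons, List.filter_cons, decide_eq_true_eq]
  split_ifs with h <;> simp

theorem colOf_append (a b : List (List Int)) (j : Nat) :
    colOf (a ++ b) j = colOf a j ++ colOf b j := by
  simp [colOf]

theorem getD_set' {α : Type} (l : List α) (m k : Nat) (x d : α) :
    (l.set m x).getD k d = if m = k ∧ m < l.length then x else l.getD k d := by
  rw [List.getD_eq_getElem?_getD, List.getElem?_set, List.getD_eq_getElem?_getD]
  split_ifs with h h2 h3 h4 <;> simp_all; omega

theorem pyGetD_idx {α : Type} (xs : List α) (i : Int) (d : α)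
    (h1 : -(xs.length : Int) ≤ i) (h2 : i < (xs.length : Int)) :
    PySem.List.pyGetD xs i d = xs.getD ((if i < 0 then i + xs.length else i).toNat) d := by
  simp only [PySem.List.pyGetD, PySem.List.pyGet?, PySem.List.pyIdx?, List.getD_eq_getElem?_getD]
  split_ifs with h3 h4 h5 <;> try omega
  · congr 2
  · rw [show xs.length - (-i).toNat = (i + xs.length).toNat from by omega]; rfl

theorem pySetD_idx {α : Type} (xs : List α) (i : Int) (v : α)
    (h1 : -(xs.length : Int) ≤ i) (h2 : i < (xs.length : Int)) :
    PySem.List.pySetD xs i v = xs.set ((if i < 0 then i + xs.length else i).toNat) v := by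
  simp only [PySem.List.pySetD, PySem.List.pySet?, PySem.List.pyIdx?]
  split_ifs with h3 h4 h5 <;> try omega
  · simp only [Option.map_some, Option.getD_some]
  · simp only [Option.map_some, Option.getD_some]; congr 1; omega

theorem scanColB_char (j0 : Int) (k : Nat) : ∀ (rows : List (List Int)),
    (∀ r ∈ rows, PySem.List.pyGetD r j0 0 = r.getD k 0) → ∀ (i : Nat),
    (scanColB rows j0 i = (none, i + rows.length) ∧ colOf rows k = []) ∨
    (∃ v s, scanColB rows j0 i = (some v, i + s + 1) ∧
      colOf rows k = v :: colOf (rows.drop (s + 1)) k) := by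
  intro rows
  induction rows with
  | nil => intro _ i; left; simp [scanColB, colOf]
  | cons r rs ih =>
    intro hrow i
    have hhd : PySem.List.pyGetD r j0 0 = r.getD k 0 := hrow r List.mem_cons_self
    have hrow' : ∀ x ∈ rs, PySem.List.pyGetD x j0 0 = x.getD k 0 :=
      fun x hx => hrow x (List.mem_cons_of_mem r hx)
    by_cases hv : 0 < r.getD k 0
    · right
      refine ⟨r.getD k 0, 0, ?_, ?_⟩
      · simp only [scanColB, hhd, if_pos hv]
      · rw [colOf_cons, if_pos hv]; simp
    · rcases ih hrow' (i + 1) with ⟨h1, h2⟩ | ⟨v, s, h1, h2⟩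
      · left
        refine ⟨?_, ?_⟩
        · simp only [scanColB, hhd, if_neg hv, h1, List.length_cons, Prod.mk.injEq]
          exact ⟨trivial, by omega⟩
        · rw [colOf_cons, if_neg hv, h2]; rfl
      · right
        refine ⟨v, s + 1, ?_, ?_⟩
        · simp only [scanColB, hhd, if_neg hv, h1, Prod.mk.injEq]
          exact ⟨trivial, by omega⟩
        · rw [colOf_cons, if_neg hv, h2]; simp

theorem innerF_apply (row : List Int) (nb2 : List (List Int)) (j : Nat) :
    innerF row nb2 (j : Int) =
      if 0 < row.getD j 0 then nb2.set j (nb2.getD j [] ++ [row.getD j 0]) else nb2 := by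
  simp only [innerF, PySem.List.pyGetD_natCast, PySem.List.pySetD_natCast]

theorem inner_spec (row : List Int) (m : Nat) (nb : List (List Int)) (hm : m ≤ nb.length) :
    ((PySem.List.pyRange 0 (m : Int) 1).foldl (innerF row) nb).length = nb.length ∧
    ∀ k, ((PySem.List.pyRange 0 (m : Int) 1).foldl (innerF row) nb).getD k [] =
      if k < m ∧ 0 < row.getD k 0 then nb.getD k [] ++ [row.getD k 0] else nb.getD k [] := by
  induction m with
  | zero =>
    rw [PySem.List.pyRange_one_eq_nil (by omega)]
    simp
  | succ m ih =>
    have hc : ((m + 1 : Nat) : Int) = (m : Int) + 1 := by push_cast; ring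
    rw [hc, PySem.List.pyRange_one_succ_right (by omega), List.foldl_append]
    obtain ⟨ihlen, ihget⟩ := ih (by omega)
    simp only [List.foldl_cons, List.foldl_nil]
    rw [innerF_apply]
    by_cases hv : 0 < row.getD m 0
    · rw [if_pos hv]
      refine ⟨by simp [ihlen], ?_⟩
      intro k
      rw [getD_set', ihget]
      by_cases hk : m = k
      · subst hk
        rw [if_pos ⟨rfl, by rw [ihlen]; omega⟩, if_neg (by omega), if_pos ⟨by omega, hv⟩]
      · rw [if_neg (by intro h; exact hk h.1), ihget]
        by_cases hklt : k < m
        · by_cases hP : 0 < row.getD k 0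
          · rw [if_pos ⟨hklt, hP⟩, if_pos ⟨by omega, hP⟩]
          · rw [if_neg (by tauto), if_neg (by tauto)]
        · rw [if_neg (by omega), if_neg (by omega)]
    · rw [if_neg hv]
      refine ⟨ihlen, ?_⟩
      intro k
      rw [ihget]
      by_cases hk : m = k
      · subst hk; rw [if_neg (by omega), if_neg (by tauto)]
      · by_cases hklt : k < m
        · by_cases hP : 0 < row.getD k 0
          · rw [if_pos ⟨hklt, hP⟩, if_pos ⟨by omega, hP⟩]
          · rw [if_neg (by tauto), if_neg (by tauto)]
        · rw [if_neg (by omega), if_neg (by omega)]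

theorem outer_spec (board : List (List Int)) : ∀ (t : Nat), t ≤ board.length →
    ∀ (nb : List (List Int)), nb.length = board.length →
    (((PySem.List.pyRange ((t : Int) - 1) (-1) (-1)).foldl (outerF board) nb).length
        = board.length) ∧
    ∀ k, k < board.length →
      ((PySem.List.pyRange ((t : Int) - 1) (-1) (-1)).foldl (outerF board) nb).getD k [] =
        nb.getD k [] ++ (colOf (board.take t) k).reverse := by
  intro t
  induction t with
  | zero =>
    intro _ nb hlen
    rw [show ((0 : Nat) : Int) - 1 = (-1 : Int) by norm_num,
      PySem.List.pyRange_neg_one_eq_nil (by omega)]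
    simp [colOf, hlen]
  | succ t ih =>
    intro ht nb hlen
    have hc : ((t + 1 : Nat) : Int) - 1 = (t : Int) := by push_cast; ring
    rw [hc, PySem.List.pyRange_neg_one_cons (by omega)]
    simp only [List.foldl_cons]
    have hrow : PySem.List.pyGetD board (t : Int) [] = board.getD t [] :=
      PySem.List.pyGetD_natCast board t []
    obtain ⟨ihlen', ihget'⟩ := inner_spec (board.getD t []) board.length nb (by omega)
    have hOlen : (outerF board nb (t : Int)).length = board.length := by
      simpa [outerF, hrow, hlen] using ihlen'
    obtain ⟨ilen, iget⟩ := ih (by omega) (outerF board nb (t : Int)) hOlen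
    refine ⟨ilen, ?_⟩
    intro k hk
    rw [iget k hk]
    have hOget : (outerF board nb (t : Int)).getD k [] =
        if k < board.length ∧ 0 < (board.getD t []).getD k 0 then
          nb.getD k [] ++ [(board.getD t []).getD k 0]
        else nb.getD k [] := by
      simpa only [outerF, hrow] using ihget' k
    rw [hOget]
    have htake : board.take (t + 1) = board.take t ++ [board.getD t []] := by
      rw [List.take_add_one]
      congr 1
      rw [List.getD_eq_getElem?_getD, List.getElem?_eq_getElem (by omega)]
      simp
    rw [htake, colOf_append, colOf_cons, colOf_nil, List.append_nil, List.reverse_append]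
    by_cases hv : 0 < (board.getD t []).getD k 0
    · rw [if_pos ⟨hk, hv⟩, if_pos hv]
      simp
    · rw [if_neg (by tauto), if_neg hv]
      simp

theorem rnb_spec (board : List (List Int)) :
    (returnNewBoardA board).length = board.length ∧
    ∀ k, k < board.length →
      (returnNewBoardA board).getD k [] = (colOf board k).reverse := by
  obtain ⟨h1, h2⟩ :=
    outer_spec board board.length le_rfl (List.replicate board.length []) (by simp)
  refine ⟨h1, ?_⟩
  intro k hk
  have := h2 k hk
  rw [List.take_length] at this
  simpa [returnNewBoardA] using this

theorem loop_eq (board : List (List Int)) : ∀ (moves : List Int) (a : Int) (st : List Int)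
    (nb : List (List Int)) (top : List Nat),
    (∀ m ∈ moves, (1 ≤ m ∧ m ≤ (board.length : Int)) ∨
      (1 - (board.length : Int) ≤ m ∧ m ≤ 0 ∧
        ∀ row ∈ board, row.length = board.length)) →
    nb.length = board.length → top.length = board.length →
    (∀ k, k < board.length →
      nb.getD k [] = (colOf (board.drop (top.getD k 0)) k).reverse) →
    (moves.foldl stepA (a, st, nb)).1 =
    (moves.foldl (stepB board) (a, st, top)).1 := by
  intro moves
  induction moves with
  | nil => intro a st nb top _ _ _ _; rfl
  | cons m ms ih =>
    intro a st nb top hmv hnb htop hinv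
    have hmcase := hmv m List.mem_cons_self
    have hmv' : ∀ x ∈ ms, (1 ≤ x ∧ x ≤ (board.length : Int)) ∨
        (1 - (board.length : Int) ≤ x ∧ x ≤ 0 ∧
          ∀ row ∈ board, row.length = board.length) :=
      fun x hx => hmv x (List.mem_cons_of_mem m hx)
    simp only [List.foldl_cons]
    set k : Nat :=
      (if (m - 1 : Int) < 0 then (m - 1) + (board.length : Int) else (m - 1)).toNat with hkdef
    have hjlo : -(board.length : Int) ≤ m - 1 := by
      rcases hmcase with ⟨h1, h2⟩ | ⟨h1, h2, _⟩ <;> omega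
    have hjhi : (m - 1 : Int) < (board.length : Int) := by
      rcases hmcase with ⟨h1, h2⟩ | ⟨h1, h2, _⟩ <;> omega
    have hklt : k < board.length := by rw [hkdef]; split_ifs <;> omega
    have hrowget : ∀ r ∈ board, PySem.List.pyGetD r (m - 1) 0 = r.getD k 0 := by
      intro r hr
      rcases hmcase with ⟨h1, h2⟩ | ⟨h1, h2, hsq⟩
      · have hmk : (m - 1 : Int) = (k : Int) := by rw [hkdef]; split_ifs <;> omega
        rw [hmk, PySem.List.pyGetD_natCast]
      · have hlen := hsq r hr
        rw [pyGetD_idx r (m - 1) 0 (by rw [hlen]; omega) (by rw [hlen]; omega), hlen, ← hkdef]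
    set t : Nat := top.getD k 0 with htdef
    have htarget : PySem.List.pyGetD nb (m - 1) [] = nb.getD k [] := by
      rw [pyGetD_idx nb (m - 1) [] (by rw [hnb]; exact hjlo) (by rw [hnb]; exact hjhi), hnb,
        ← hkdef]
    have hpytop : PySem.List.pyGetD top (m - 1) 0 = t := by
      rw [pyGetD_idx top (m - 1) 0 (by rw [htop]; exact hjlo) (by rw [htop]; exact hjhi), htop,
        ← hkdef]
    have hsetTop : ∀ (x : Nat), PySem.List.pySetD top (m - 1) x = top.set k x := by
      intro x
      rw [pySetD_idx top (m - 1) x (by rw [htop]; exact hjlo) (by rw [htop]; exact hjhi), htop,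
        ← hkdef]
    have hrowdrop : ∀ r ∈ board.drop t, PySem.List.pyGetD r (m - 1) 0 = r.getD k 0 :=
      fun r hr => hrowget r (List.mem_of_mem_drop hr)
    have hinvk := hinv k hklt
    rcases scanColB_char (m - 1) k (board.drop t) hrowdrop t with ⟨hscan, hcol⟩ | ⟨v, s', hscan, hcol⟩
    · -- column exhausted: A skips, B only moves the pointer past the end
      have hnbk : nb.getD k [] = [] := by rw [hinvk, hcol]; rfl
      have hnbk2 : nb[k]?.getD ([] : List Int) = [] := hnbk
      have hA : stepA (a, st, nb) m = (a, st, nb) := by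
        simp [stepA, htarget, hnbk2]
      have hB : stepB board (a, st, top) m =
          (a, st, top.set k (t + (board.drop t).length)) := by
        simp only [stepB]
        rw [hpytop, hscan, hsetTop]
      rw [hA, hB]
      apply ih a st nb _ hmv' hnb (by simp [htop])
      intro k' hk'
      rw [getD_set']
      by_cases hkk : k = k'
      · subst hkk
        rw [if_pos ⟨rfl, by omega⟩, hnbk]
        have hdrop : board.drop (t + (board.drop t).length) = [] :=
          List.drop_eq_nil_of_le (by simp; omega)
        rw [hdrop, colOf_nil]; rfl
      · rw [if_neg (by tauto)]
        exact hinv k' hk'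
    · -- a doll is found: both pick v, the first positive cell of the remaining column
      have hrest : nb.getD k [] = (colOf (board.drop (t + s' + 1)) k).reverse ++ [v] := by
        rw [hinvk, hcol]; simp [List.drop_drop]
        rfl
      have hpop : PySem.List.pop? (nb.getD k []) =
          some (v, (colOf (board.drop (t + s' + 1)) k).reverse) := by
        rw [hrest]; exact PySem.List.pop?_last _ _
      have hset : PySem.List.pySetD nb (m - 1) ((colOf (board.drop (t + s' + 1)) k).reverse) =
          nb.set k ((colOf (board.drop (t + s' + 1)) k).reverse) := by
        rw [pySetD_idx nb (m - 1) _ (by rw [hnb]; exact hjlo) (by rw [hnb]; exact hjhi), hnb,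
          ← hkdef]
      have hlenpos : 0 < (nb.getD k []).length := by rw [hrest]; simp
      have hpop2 : PySem.List.pop? (nb[k]?.getD ([] : List Int)) =
          some (v, (colOf (board.drop (t + s' + 1)) k).reverse) := hpop
      have hlenpos2 : 0 < (nb[k]?.getD ([] : List Int)).length := hlenpos
      have hinv' : ∀ k', k' < board.length →
          (nb.set k ((colOf (board.drop (t + s' + 1)) k).reverse)).getD k' [] =
          (colOf (board.drop ((top.set k (t + s' + 1)).getD k' 0)) k').reverse := by
        intro k' hk'
        rw [getD_set', getD_set']
        by_cases hkk : k = k'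
        · subst hkk
          rw [if_pos ⟨rfl, by omega⟩, if_pos ⟨rfl, by omega⟩]
        · rw [if_neg (by tauto), if_neg (by tauto)]
          exact hinv k' hk'
      have hB1 : ∀ (a' : Int) (st' : List Int),
          (ms.foldl stepA (a', st', nb.set k ((colOf (board.drop (t + s' + 1)) k).reverse))).1 =
          (ms.foldl (stepB board) (a', st', top.set k (t + s' + 1))).1 := by
        intro a' st'
        exact ih a' st' _ _ hmv' (by simp [hnb]) (by simp [htop]) hinv'
      by_cases hst : st = []
      · subst hst
        have hA : stepA (a, [], nb) m =
            (a, [v], nb.set k ((colOf (board.drop (t + s' + 1)) k).reverse)) := by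
          simp [stepA, htarget, hlenpos2, hpop2, hset]
        have hB : stepB board (a, [], top) m =
            (a, [v], top.set k (t + s' + 1)) := by
          simp only [stepB]
          rw [hpytop, hscan, hsetTop]
          rfl
        rw [hA, hB]
        exact hB1 a [v]
      · have hsplit : st.dropLast ++ [st.getLast hst] = st := List.dropLast_append_getLast hst
        have hpopst : PySem.List.pop? st = some (st.getLast hst, st.dropLast) := by
          conv_lhs => rw [← hsplit]
          exact PySem.List.pop?_last _ _
        have hlast : st.getLast? = some (st.getLast hst) := List.getLast?_eq_some_getLast hst
        by_cases heq : st.getLast hst = v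
        · have hA : stepA (a, st, nb) m =
              (a + 2, st.dropLast, nb.set k ((colOf (board.drop (t + s' + 1)) k).reverse)) := by
            simp [stepA, htarget, hlenpos2, hpop2, hset, hpopst, List.length_pos_iff.mpr hst, heq]
          have hB : stepB board (a, st, top) m =
              (a + 2, st.dropLast, top.set k (t + s' + 1)) := by
            simp only [stepB]
            rw [hpytop, hscan, hsetTop]
            simp only [hlast]
            rw [if_pos heq]
          rw [hA, hB]
          exact hB1 (a + 2) st.dropLast
        · have hA : stepA (a, st, nb) m =
              (a, st ++ [v], nb.set k ((colOf (board.drop (t + s' + 1)) k).reverse)) := by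
            simp [stepA, htarget, hlenpos2, hpop2, hset, hpopst, List.length_pos_iff.mpr hst, heq]
            conv_rhs => rw [← hsplit]
            simp
          have hB : stepB board (a, st, top) m =
              (a, st ++ [v], top.set k (t + s' + 1)) := by
            simp only [stepB]
            rw [hpytop, hscan, hsetTop]
            simp only [hlast]
            rw [if_neg heq]
          rw [hA, hB]
          exact hB1 a (st ++ [v])

-- ===== VERDICT (by name: the statement is the Claim_ definition above) =====
theorem solution_spec : Claim_equal_solution := by
  intro board moves _ hpre
  unfold Spec_solution solution solution_alt
  obtain ⟨hlen, hget⟩ := rnb_spec board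
  apply loop_eq board moves 0 [] _ _ hpre.2 hlen (by simp)
  intro k hk
  have h0 : (List.replicate board.length (0 : Nat)).getD k 0 = 0 := by
    simp [List.getD_eq_getElem?_getD, hk]
  rw [h0, List.drop_zero]
  exact hget k hk
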